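-- pv_equiv track=rewrite | github.com/TomasBayer/projecteuler | problem051.py | sterne
-- ===== SOURCE A (Python) =====
-- def sterne(s,a):
-- 	if a:
-- 		for h in sterne(s,a-1):
-- 			for i in range(0,len(h)+1):
-- 				if i == 0 or h[i-1] != "*":
-- 					yield h[:i] + "*" + h[i:]
-- 	else:
-- 		yield s
-- ===== SOURCE B (Python) =====
-- def sterne(s, a):
--     results = [s]
--     for _ in range(a):
--         nxt = []
--         for h in results:
--             for i in range(len(h) + 1):
--                 if i == 0 or h[i - 1] != "*":
--                     nxt.append(h[:i] + "*" + h[i:])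
--         results = nxt
--     yield from results
-- ===== Notes on version B (the rewrite author's own statement) =====
-- stated objective: simpler
-- what changed: Replaces the recursive generator on a with an iterative generation-by-generation build of a results list (loop a times, each pass inserting one '*' per allowed position), yielding the final list.
-- crash fix: For negative a, A's recursion never reaches the base case and raises RecursionError when iterated; B's range(a) is empty so B yields just s. — e.g. on sterne("a", -1): A raises RecursionError, B returns ["a"]
import Mathlib
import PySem

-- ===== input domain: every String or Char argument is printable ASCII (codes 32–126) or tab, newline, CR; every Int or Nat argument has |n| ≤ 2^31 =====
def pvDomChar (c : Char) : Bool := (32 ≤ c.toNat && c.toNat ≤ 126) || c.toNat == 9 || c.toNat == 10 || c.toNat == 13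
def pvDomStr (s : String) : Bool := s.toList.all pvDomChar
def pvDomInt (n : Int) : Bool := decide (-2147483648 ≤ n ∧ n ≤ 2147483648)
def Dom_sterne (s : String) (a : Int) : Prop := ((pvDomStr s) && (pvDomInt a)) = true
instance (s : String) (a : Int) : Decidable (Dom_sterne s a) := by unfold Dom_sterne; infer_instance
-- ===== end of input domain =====

-- B replaces A's recursion on a by an iterative generation-by-generation build of the
-- list of results (same inner insertion loop, so the output sequence is identical).
-- Both Pythons are generators; equivalence is about the yielded sequence as a list.

-- the inner insertion pass, identical text in both Pythons:
-- for i in range(len(h)+1): if i == 0 or h[i-1] != "*": yield/append h[:i] + "*" + h[i:]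
def starStep (h : String) : List String :=
  (PySem.List.pyRange 0 ((h.toList.length : Int) + 1) 1).filterMap (fun i =>
    if i = 0 ∨ PySem.List.pyGet? h.toList (i - 1) ≠ some '*' then
      some (String.ofList (PySem.List.slice h.toList none (some i) ++
              '*' :: PySem.List.slice h.toList (some i) none))
    else none)

-- ===== PORT A =====
-- A recurses on a (a, a-1, …, 0); for a < 0 the Python never reaches the base case and
-- raises RecursionError (excluded by Pre_), so on Pre_ the recursion depth is exactly a.toNat.
def sterneGo (s : String) : Nat → List String
  | 0 => [s]
  | n + 1 => (sterneGo s n).flatMap starStep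

def sterne (s : String) (a : Int) : List String :=
  sterneGo s a.toNat

-- ===== PORT B =====
-- results = [s]; for _ in range(a): results = one insertion pass over results; yield from results
def sterne_alt (s : String) (a : Int) : List String :=
  (PySem.List.pyRange 0 a 1).foldl (fun results _ => results.flatMap starStep) [s]

-- ===== PRECONDITION & SPEC =====
-- Pre_ excludes a < 0, on which the Python A raises RecursionError.
def Pre_sterne (s : String) (a : Int) : Prop := 0 ≤ a
instance (s : String) (a : Int) : Decidable (Pre_sterne s a) := by unfold Pre_sterne; infer_instance
def pvWitness_sterne : String × Int := ("ab", 1)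

-- For negative a, A's recursion never reaches the base case and raises RecursionError when
-- iterated; B's range(a) is empty so B yields just s.
def Raises_sterne (s : String) (a : Int) : Prop := a < 0
instance (s : String) (a : Int) : Decidable (Raises_sterne s a) := by unfold Raises_sterne; infer_instance
def pvRaiseWitness_sterne : String × Int := ("a", -1)
def pvRaiseWitnessOut_sterne : List String := ["a"]

def Spec_sterne (s : String) (a : Int) (out : List String) : Prop := out = sterne_alt s a
instance (s : String) (a : Int) (out : List String) : Decidable (Spec_sterne s a out) := by unfold Spec_sterne; infer_instance

-- ===== CLAIM (what is proved, stated in full; the proofs are below) =====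
def Claim_equal_sterne : Prop := ∀ (s : String) (a : Int), Dom_sterne s a → Pre_sterne s a → Spec_sterne s a (sterne s a)
def Claim_raises_sterne : Prop := (∀ (s : String) (a : Int), Dom_sterne s a → Raises_sterne s a → ¬ Pre_sterne s a) ∧ (Dom_sterne (pvRaiseWitness_sterne.1) (pvRaiseWitness_sterne.2) ∧ Raises_sterne (pvRaiseWitness_sterne.1) (pvRaiseWitness_sterne.2) ∧ sterne_alt (pvRaiseWitness_sterne.1) (pvRaiseWitness_sterne.2) = pvRaiseWitnessOut_sterne)

-- ===== LEMMAS AND PROOFS =====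
lemma foldl_pyRange_eq_sterneGo (s : String) (n : Nat) :
    (PySem.List.pyRange 0 (n : Int) 1).foldl (fun results _ => results.flatMap starStep) [s]
      = sterneGo s n := by
  induction n with
  | zero => simp [PySem.List.pyRange_one_eq_nil, sterneGo]
  | succ n ih =>
      have hc : ((n + 1 : Nat) : Int) = (n : Int) + 1 := by push_cast; ring
      rw [hc, PySem.List.pyRange_one_succ_right (by positivity)]
      simp [List.foldl_append, ih, sterneGo]

-- ===== VERDICT (by name: the statement is the Claim_ definition above) =====
theorem sterne_spec : Claim_equal_sterne := by
  intro s a _ hpre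
  unfold Spec_sterne sterne sterne_alt
  have ha : a = ((a.toNat : Nat) : Int) := (Int.toNat_of_nonneg hpre).symm
  conv_rhs => rw [ha]
  rw [foldl_pyRange_eq_sterneGo]

def sterne_raises : Claim_raises_sterne := by
  unfold Claim_raises_sterne
  exact ⟨fun s a _ hr hp => by unfold Raises_sterne at hr; unfold Pre_sterne at hp; omega, by decide⟩
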